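-- pv_equiv track=rewrite | github.com/eclipse-efbt/efbt | birds_nest/pybirdai/process_steps/derivation_generation/member_link_derivation/generator.py | _find_common_domain
-- ===== SOURCE A (Python) =====
-- from typing import Dict, List, Optional, Tuple
--
-- def _find_common_domain(member_ids: List[str]) -> str:
--     """Find the common domain prefix from a list of member IDs.
--
--     The domain is the common prefix before the member code.
--     E.g., for ['INSTTTNL_SCTR_S122_A_1', 'INSTTTNL_SCTR_S123'], domain is 'INSTTTNL_SCTR'.
--
--     Args:
--         member_ids: List of member ID strings
--
--     Returns:
--         The common domain prefix, or empty string if none found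
--     """
--     if not member_ids:
--         return ""
--
--     # Split each member by underscore and find common prefix parts
--     split_members = [m.split("_") for m in member_ids]
--
--     # Find common prefix parts
--     common_parts = []
--     min_len = min(len(parts) for parts in split_members)
--
--     for i in range(min_len - 1):  # -1 to leave at least one part as the code
--         part = split_members[0][i]
--         if all(parts[i] == part for parts in split_members):
--             common_parts.append(part)
--         else:
--             break
--
--     return "_".join(common_parts) if common_parts else ""
-- ===== SOURCE B (Python) =====
-- def _find_common_domain(member_ids):
--     if not member_ids:
--         return ""
--     splits = [m.split("_") for m in member_ids]
--     min_len = min(map(len, splits))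
--     # fold: shrink a running common prefix member-by-member
--     common = splits[0]
--     for parts in splits[1:]:
--         k = 0
--         while k < len(common) and k < len(parts) and common[k] == parts[k]:
--             k += 1
--         common = common[:k]
--     return "_".join(common[: min_len - 1])
-- ===== Notes on version B (the rewrite author's own statement) =====
-- stated objective: alternative
-- what changed: Replaces A's index-by-index loop that rescans every member at each position with a member-by-member fold that shrinks a running common-prefix list (cut at first mismatch), then truncates it to min_len-1 parts before joining.
import Mathlib
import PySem

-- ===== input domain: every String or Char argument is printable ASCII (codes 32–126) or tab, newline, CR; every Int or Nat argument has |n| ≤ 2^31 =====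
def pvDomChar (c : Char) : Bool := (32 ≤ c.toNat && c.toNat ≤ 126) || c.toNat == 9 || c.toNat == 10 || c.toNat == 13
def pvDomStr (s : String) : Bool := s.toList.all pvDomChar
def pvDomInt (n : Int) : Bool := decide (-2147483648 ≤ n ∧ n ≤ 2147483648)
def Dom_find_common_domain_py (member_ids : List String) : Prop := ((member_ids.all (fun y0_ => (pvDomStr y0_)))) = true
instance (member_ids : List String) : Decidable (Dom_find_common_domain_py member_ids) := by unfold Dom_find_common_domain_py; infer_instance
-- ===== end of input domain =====

-- B replaces A's per-index scan over all members by a member-by-member fold that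
-- shrinks a running common-prefix list; same return value (alternative decomposition).

-- m.split("_") — nonempty separator, exact via PySem.Chars.splitOn
def pySplitU (m : String) : List String := (PySem.Chars.splitOn m.toList ['_']).map String.ofList

-- ===== PORT A =====
-- the 'for i in range(min_len-1)' loop with break; split_members[0][i] / parts[i]
-- are ported with getD "" — in Python they are always in range (i < min_len ≤ len parts)
def aLoop (splits : List (List String)) (i m : Nat) (acc : List String) : List String :=
  if i < m then
    let part := (splits.headD []).getD i ""
    if splits.all (fun parts => parts.getD i "" == part) then
      aLoop splits (i+1) m (acc ++ [part])
    else acc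
  else acc
termination_by m - i

def find_common_domain_py (member_ids : List String) : String :=
  match member_ids with
  | [] => ""
  | m0 :: ms =>
    let s0 := pySplitU m0
    let split_members := s0 :: ms.map pySplitU
    let min_len := (ms.map (fun m => (pySplitU m).length)).foldl min s0.length
    let common_parts := aLoop split_members 0 (min_len - 1) []
    if common_parts.isEmpty then "" else PySem.Str.join "_" common_parts

-- ===== PORT B =====
-- Source B's inner while loop: longest common prefix of two part lists, cut at first mismatch
def lcpB : List String → List String → List String
  | a :: as, b :: bs => if a == b then a :: lcpB as bs else []
  | _, _ => []

def find_common_domain_py_alt (member_ids : List String) : String :=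
  match member_ids with
  | [] => ""
  | m0 :: ms =>
    let s0 := pySplitU m0
    let rest := ms.map pySplitU
    let min_len := (rest.map List.length).foldl min s0.length
    let common := rest.foldl lcpB s0
    PySem.Str.join "_" (common.take (min_len - 1))

-- ===== PRECONDITION & SPEC =====
def Spec_find_common_domain_py (member_ids : List String) (out : String) : Prop := out = find_common_domain_py_alt member_ids
instance (member_ids : List String) (out : String) : Decidable (Spec_find_common_domain_py member_ids out) := by unfold Spec_find_common_domain_py; infer_instance

-- ===== CLAIM (what is proved, stated in full; the proofs are below) =====
def Claim_equal_find_common_domain_py : Prop := ∀ (member_ids : List String), Dom_find_common_domain_py member_ids → Spec_find_common_domain_py member_ids (find_common_domain_py member_ids)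

-- ===== LEMMAS AND PROOFS =====

theorem lcpB_prefix (a b : List String) : lcpB a b <+: a := by
  induction a generalizing b with
  | nil => cases b <;> simp [lcpB]
  | cons x as ih =>
    cases b with
    | nil => simp [lcpB]
    | cons y bs =>
      simp only [lcpB]
      split
      · exact List.cons_prefix_cons.mpr ⟨rfl, ih bs⟩
      · exact List.nil_prefix

theorem foldl_lcpB_prefix (l : List (List String)) (a : List String) :
    l.foldl lcpB a <+: a := by
  induction l generalizing a with
  | nil => simp
  | cons b l ih => exact (ih (lcpB a b)).trans (lcpB_prefix a b)

theorem prefix_getD (l₁ l₂ : List String) (h : l₁ <+: l₂) (i : Nat) (hi : i < l₁.length) :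
    l₁.getD i "" = l₂.getD i "" := by
  have hi2 : i < l₂.length := lt_of_lt_of_le hi h.length_le
  rw [List.getD_eq_getElem _ _ hi, List.getD_eq_getElem _ _ hi2]
  exact h.getElem hi

theorem lcpB_length_iff (a b : List String) (i : Nat) :
    i < (lcpB a b).length ↔
      i < a.length ∧ i < b.length ∧ ∀ j ≤ i, a.getD j "" = b.getD j "" := by
  induction a generalizing b i with
  | nil => cases b <;> simp [lcpB]
  | cons x as ih =>
    cases b with
    | nil => simp [lcpB]
    | cons y bs =>
      simp only [lcpB]
      by_cases hxy : x = y
      · subst hxy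
        simp only [beq_self_eq_true, if_true, List.length_cons]
        cases i with
        | zero => simp
        | succ i' =>
          rw [Nat.succ_lt_succ_iff, Nat.succ_lt_succ_iff, Nat.succ_lt_succ_iff, ih]
          constructor
          · rintro ⟨h1, h2, h3⟩
            refine ⟨h1, h2, fun j hj => ?_⟩
            cases j with
            | zero => simp
            | succ j' =>
              simpa using h3 j' (Nat.succ_le_succ_iff.mp hj)
          · rintro ⟨h1, h2, h3⟩
            refine ⟨h1, h2, fun j hj => ?_⟩
            simpa using h3 (j+1) (Nat.succ_le_succ hj)
      · have : (x == y) = false := beq_eq_false_iff_ne.mpr hxy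
        simp only [this, if_neg, Bool.false_eq_true, not_false_eq_true, List.length_nil]
        constructor
        · omega
        · rintro ⟨-, -, h3⟩
          exact absurd (by simpa using h3 0 (Nat.zero_le i)) hxy

theorem foldl_lcpB_length_iff (l : List (List String)) (a : List String) (i : Nat) :
    i < (l.foldl lcpB a).length ↔
      i < a.length ∧ ∀ s ∈ l, i < s.length ∧ ∀ j ≤ i, s.getD j "" = a.getD j "" := by
  induction l generalizing a with
  | nil => simp
  | cons b l ih =>
    simp only [List.foldl_cons, ih, List.mem_cons]
    constructor
    · rintro ⟨h1, h4⟩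
      have h1' := (lcpB_length_iff a b i).mp h1
      refine ⟨h1'.1, fun s hs => ?_⟩
      rcases hs with rfl | hs
      · exact ⟨h1'.2.1, fun j hj => (h1'.2.2 j hj).symm⟩
      · rcases h4 s hs with ⟨h5, h6⟩
        refine ⟨h5, fun j hj => ?_⟩
        rw [h6 j hj]
        exact prefix_getD _ _ (lcpB_prefix a b) j (lt_of_le_of_lt hj h1)
    · rintro ⟨h1, h2⟩
      have hb := h2 b (Or.inl rfl)
      have hlen : i < (lcpB a b).length :=
        (lcpB_length_iff a b i).mpr ⟨h1, hb.1, fun j hj => (hb.2 j hj).symm⟩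
      refine ⟨hlen, fun s hs => ?_⟩
      rcases h2 s (Or.inr hs) with ⟨h5, h6⟩
      refine ⟨h5, fun j hj => ?_⟩
      rw [h6 j hj]
      exact (prefix_getD _ _ (lcpB_prefix a b) j (lt_of_le_of_lt hj hlen)).symm

theorem foldl_min_le_init (l : List Nat) (a : Nat) : l.foldl min a ≤ a := by
  induction l generalizing a with
  | nil => simp
  | cons b l ih => exact (ih (min a b)).trans (min_le_left a b)

theorem foldl_min_le_mem (l : List Nat) (a x : Nat) (hx : x ∈ l) : l.foldl min a ≤ x := by
  induction l generalizing a with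
  | nil => simp at hx
  | cons b l ih =>
    rcases List.mem_cons.mp hx with rfl | hx
    · exact (foldl_min_le_init l (min a x)).trans (min_le_right a x)
    · exact ih (min a b) hx

-- closed form of A's loop body (acc factored out)
def segA (splits : List (List String)) (i m : Nat) : List String :=
  if i < m then
    let part := (splits.headD []).getD i ""
    if splits.all (fun parts => parts.getD i "" == part) then
      part :: segA splits (i+1) m
    else []
  else []
termination_by m - i

theorem aLoop_eq_segA_fuel (splits : List (List String)) :
    ∀ f i m acc, m - i ≤ f → aLoop splits i m acc = acc ++ segA splits i m := by
  intro f
  induction f with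
  | zero =>
    intro i m acc hf
    have h : ¬ i < m := by omega
    rw [aLoop, segA]
    simp [h]
  | succ f ihf =>
    intro i m acc hf
    by_cases h : i < m
    · rw [aLoop, segA]
      simp only [h, if_true]
      by_cases hall : (splits.all (fun parts => parts.getD i "" == (splits.headD []).getD i "")) = true
      · rw [if_pos hall, if_pos hall, ihf (i+1) m _ (by omega)]
        simp
      · rw [if_neg hall, if_neg hall, List.append_nil]
    · rw [aLoop, segA]
      simp [h]

theorem aLoop_eq_segA (splits : List (List String)) (i m : Nat) (acc : List String) :
    aLoop splits i m acc = acc ++ segA splits i m :=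
  aLoop_eq_segA_fuel splits (m - i) i m acc le_rfl

-- the heart: A's scan from position i equals the slice of B's folded common prefix,
-- given every earlier position matched
theorem segA_eq_slice (s0 : List String) (rest : List (List String)) (min_len : Nat)
    (hs0 : min_len ≤ s0.length) (hrest : ∀ s ∈ rest, min_len ≤ s.length) :
    ∀ f i, min_len - 1 - i ≤ f →
      (∀ j, j < i → ∀ s ∈ rest, s.getD j "" = s0.getD j "") →
      segA (s0 :: rest) i (min_len - 1) =
        ((rest.foldl lcpB s0).drop i).take (min_len - 1 - i) := by
  intro f
  induction f with
  | zero =>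
    intro i hf _
    have : ¬ i < min_len - 1 := by omega
    rw [segA]
    simp [this, show min_len - 1 - i = 0 from by omega]
  | succ f ihf =>
    intro i hf hinv
    by_cases h : i < min_len - 1
    · rw [segA]
      simp only [h, if_true, List.headD_cons]
      have hiless : i < min_len := by omega
      by_cases hall : ((s0 :: rest).all (fun parts => parts.getD i "" == s0.getD i "")) = true
      · -- all members match at position i
        have hmatch : ∀ s ∈ rest, s.getD i "" = s0.getD i "" := by
          intro s hs
          have := (List.all_eq_true.mp hall) s (List.mem_cons_of_mem _ hs)
          exact beq_iff_eq.mp this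
        have hC : i < (rest.foldl lcpB s0).length := by
          rw [foldl_lcpB_length_iff]
          refine ⟨lt_of_lt_of_le hiless hs0, fun s hs => ?_⟩
          refine ⟨lt_of_lt_of_le hiless (hrest s hs), fun j hj => ?_⟩
          rcases Nat.lt_or_ge j i with hji | hji
          · exact hinv j hji s hs
          · have : j = i := by omega
            subst this
            exact hmatch s hs
        rw [hall, if_pos rfl]
        have hrec := ihf (i+1) (by omega) (by
          intro j hj s hs
          rcases Nat.lt_or_ge j i with hji | hji
          · exact hinv j hji s hs
          · have : j = i := by omega
            subst this
            exact hmatch s hs)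
        rw [hrec]
        rw [List.drop_eq_getElem_cons hC]
        have htake : min_len - 1 - i = (min_len - 1 - (i+1)) + 1 := by omega
        rw [htake, List.take_succ_cons]
        congr 1
        rw [← List.getD_eq_getElem _ "" hC]
        exact (prefix_getD _ _ (foldl_lcpB_prefix rest s0) i hC).symm
      · -- mismatch at position i: both sides empty
        rw [if_neg (by simpa using hall)]
        have hC : (rest.foldl lcpB s0).length ≤ i := by
          by_contra hcon
          rw [Nat.not_le] at hcon
          have := (foldl_lcpB_length_iff rest s0 i).mp hcon
          apply hall
          rw [List.all_eq_true]
          intro s hs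
          rcases List.mem_cons.mp hs with rfl | hs
          · exact beq_self_eq_true _
          · exact beq_iff_eq.mpr ((this.2 s hs).2 i le_rfl)
        rw [List.drop_eq_nil_of_le hC]
        simp
    · rw [segA]
      simp [h, show min_len - 1 - i = 0 from by omega]

theorem join_nil_str : PySem.Str.join "_" ([] : List String) = "" := by decide

-- ===== VERDICT (by name: the statement is the Claim_ definition above) =====
theorem find_common_domain_py_spec : Claim_equal_find_common_domain_py := by
  unfold Claim_equal_find_common_domain_py
  intro member_ids _
  unfold Spec_find_common_domain_py
  cases member_ids with
  | nil => rfl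
  | cons m0 ms =>
    simp only [find_common_domain_py, find_common_domain_py_alt]
    set s0 := pySplitU m0 with hs0def
    set rest := ms.map pySplitU with hrestdef
    have hminmap : (rest.map List.length) = ms.map (fun m => (pySplitU m).length) := by
      rw [hrestdef, List.map_map]; rfl
    set min_len := (ms.map (fun m => (pySplitU m).length)).foldl min s0.length with hml
    rw [hminmap]
    have hs0le : min_len ≤ s0.length := foldl_min_le_init _ _
    have hrestle : ∀ s ∈ rest, min_len ≤ s.length := by
      intro s hs
      rcases List.mem_map.mp hs with ⟨m, hm, rfl⟩
      exact foldl_min_le_mem _ _ _ (List.mem_map.mpr ⟨m, hm, rfl⟩)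
    have hseg := segA_eq_slice s0 rest min_len hs0le hrestle (min_len - 1) 0
      (by omega) (by intro j hj; omega)
    rw [aLoop_eq_segA, List.nil_append, hseg]
    simp only [List.drop_zero, Nat.sub_zero]
    by_cases hemp : ((rest.foldl lcpB s0).take (min_len - 1)).isEmpty = true
    · rw [if_pos hemp]
      rw [List.isEmpty_iff.mp hemp]
      exact join_nil_str.symm
    · rw [if_neg hemp]
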